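-- pv_equiv track=rewrite | github.com/zalnemer2287/FirstLab2XC3 | code.py | are_valid_groups
-- ===== SOURCE A (Python) =====
-- def are_valid_groups(studentNumbers, Groups):
--     array = []
--     for studentNumber in studentNumbers:
--         array.append(str(studentNumber))
--     studentNumbers.clear()
--
--     studentNumbers = array
--
--     array2 = []
--     array3 = []
--
--     for i in range (0, len(Groups)):
--         array3 = []
--
--         for stdNum in Groups[i]:
--             array3.append(str(stdNum))
--
--         Groups[i] = array3
--
--     foundNumbers = []
--     for studentNumber in studentNumbers:
--         found = False
--         for group in Groups:
--             for studentNumber2 in group: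
--                 if (studentNumber == studentNumber2):
--                     if studentNumber not in foundNumbers:
--                         found = True
--                         foundNumbers.append(studentNumber)
--                     else:
--                         found = False
--         if (found):
--             pass
--         else:
--             return False
--     return True
-- ===== SOURCE B (Python) =====
-- def are_valid_groups(studentNumbers, Groups):
--     # reproduce A's observable side effects (str-conversion + in-place rewrite)
--     students = [str(s) for s in studentNumbers]
--     studentNumbers.clear()
--     counts = {}
--     for i in range(len(Groups)):
--         g = [str(x) for x in Groups[i]]
--         Groups[i] = g
--         for m in g:
--             counts[m] = counts.get(m, 0) + 1
--     seen = set()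
--     for s in students:
--         if s in seen or counts.get(s, 0) != 1:
--             return False
--         seen.add(s)
--     return True
-- ===== Notes on version B (the rewrite author's own statement) =====
-- stated objective: alternative
-- what changed: A rescans every group member for every student (with a linear foundNumbers scan inside); B builds one count table over all group members in a single pass and then checks each student once against the table and a seen-set; measured times are comparable because A can exit early.
import Mathlib
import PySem

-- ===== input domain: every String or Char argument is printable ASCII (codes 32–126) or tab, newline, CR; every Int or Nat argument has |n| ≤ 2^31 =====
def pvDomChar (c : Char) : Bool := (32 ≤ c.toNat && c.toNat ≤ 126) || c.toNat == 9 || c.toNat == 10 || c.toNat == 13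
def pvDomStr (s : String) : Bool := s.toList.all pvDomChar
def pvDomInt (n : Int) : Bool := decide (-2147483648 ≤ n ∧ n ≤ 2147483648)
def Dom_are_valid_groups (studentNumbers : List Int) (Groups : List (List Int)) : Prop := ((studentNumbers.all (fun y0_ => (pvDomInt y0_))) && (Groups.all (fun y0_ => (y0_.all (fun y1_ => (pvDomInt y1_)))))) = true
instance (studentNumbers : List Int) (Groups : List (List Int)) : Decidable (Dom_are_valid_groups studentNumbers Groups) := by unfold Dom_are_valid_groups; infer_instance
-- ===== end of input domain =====

-- B replaces A's per-student rescan of all groups (with an inner foundNumbers scan) by one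
-- count-table pass plus one linear check pass; equivalence is about the RETURN value only
-- (both Pythons perform the same in-place str-conversion mutation of the arguments).

-- ===== PORT A =====
-- body of A's innermost 'for studentNumber2 in group' loop; state = (found, foundNumbers)
def avgStep (s : String) (st : Bool × List String) (s2 : String) : Bool × List String :=
  if s == s2 then
    if !(st.2.contains s) then (true, st.2 ++ [s]) else (false, st.2)
  else st

-- A's outer 'for studentNumber in studentNumbers' loop with its early 'return False'
def avgLoop (students : List String) (groups : List (List String)) (fn : List String) : Bool :=
  match students with
  | [] => true
  | s :: rest =>
    let r := groups.foldl (fun st group => group.foldl (avgStep s) st) (false, fn)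
    if r.1 then avgLoop rest groups r.2 else false

def are_valid_groups (studentNumbers : List Int) (Groups : List (List Int)) : Bool :=
  let array := studentNumbers.foldl (fun acc s => acc ++ [PySem.Int.toStr s]) []
  let groups := Groups.map (fun g => g.foldl (fun acc x => acc ++ [PySem.Int.toStr x]) [])
  avgLoop array groups []

-- ===== PORT B =====
-- B's single check pass over the students, with a seen-set
def bGo (students : List String) (counts : PySem.Dict String Int) (seen : PySem.Set String) : Bool :=
  match students with
  | [] => true
  | s :: rest =>
    if PySem.Set.contains seen s || !(counts.getD s 0 == 1) then false
    else bGo rest counts (PySem.Set.add seen s)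

def are_valid_groups_alt (studentNumbers : List Int) (Groups : List (List Int)) : Bool :=
  let students := studentNumbers.map (fun s => PySem.Int.toStr s)
  let counts := Groups.foldl
    (fun d g => (g.map (fun x => PySem.Int.toStr x)).foldl (fun d m => d.modify m 0 (· + 1)) d)
    PySem.Dict.empty
  bGo students counts PySem.Set.empty

-- ===== PRECONDITION & SPEC =====
def Spec_are_valid_groups (studentNumbers : List Int) (Groups : List (List Int)) (out : Bool) : Prop := out = are_valid_groups_alt studentNumbers Groups
instance (studentNumbers : List Int) (Groups : List (List Int)) (out : Bool) : Decidable (Spec_are_valid_groups studentNumbers Groups out) := by unfold Spec_are_valid_groups; infer_instance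

-- ===== CLAIM (what is proved, stated in full; the proofs are below) =====
def Claim_equal_are_valid_groups : Prop := ∀ (studentNumbers : List Int) (Groups : List (List Int)), Dom_are_valid_groups studentNumbers Groups → Spec_are_valid_groups studentNumbers Groups (are_valid_groups studentNumbers Groups)

-- ===== LEMMAS AND PROOFS =====

-- A's scan of one flat member list for student s, from an arbitrary state (f0, fn):
-- a match on s ∈ fn forces found := false; otherwise found ends true iff s occurs exactly once.
lemma avgScan (s : String) (xs : List String) (f0 : Bool) (fn : List String) :
    xs.foldl (avgStep s) (f0, fn) =
      if s ∈ fn then (decide (xs.count s = 0) && f0, fn)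
      else if xs.count s = 0 then (f0, fn)
      else (decide (xs.count s = 1), fn ++ [s]) := by
  induction xs generalizing f0 fn with
  | nil => simp
  | cons y ys ih =>
    by_cases hy : s = y
    · subst hy
      have hcnt : List.count s (s :: ys) = List.count s ys + 1 := List.count_cons_self ..
      by_cases hmem : s ∈ fn
      · simp [avgStep, hmem, ih, hcnt]
      · simp only [List.foldl_cons, avgStep, BEq.rfl, if_true]
        have : fn.contains s = false := by simpa using hmem
        simp only [this, Bool.not_false, if_true, ih, hcnt]
        have hmem2 : s ∈ fn ++ [s] := by simp
        by_cases h0 : ys.count s = 0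
        · simp [hmem, hmem2, h0]
        · simp [hmem, hmem2, h0]
    · have hby : (s == y) = false := by simp [hy]
      have hcnt : List.count s (y :: ys) = List.count s ys := by
        simp [Ne.symm hy]
      simp [avgStep, hby, ih, hcnt]

-- A's outer loop equals B's check pass, given counts = occurrence counts of the flattened
-- groups and foundNumbers/seen agreeing as sets of already-processed students.
lemma mainEq (groups : List (List String)) (counts : PySem.Dict String Int)
    (hc : ∀ x, counts.getD x 0 = (groups.flatten.count x : Int)) :
    ∀ (students : List String) (fn : List String) (seen : PySem.Set String),
      (∀ x, x ∈ fn ↔ x ∈ seen) →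
      avgLoop students groups fn = bGo students counts seen := by
  intro students
  induction students with
  | nil => intro fn seen _; rfl
  | cons s rest ih =>
    intro fn seen hinv
    have hflat : groups.foldl (fun st group => group.foldl (avgStep s) st) (false, fn)
        = groups.flatten.foldl (avgStep s) (false, fn) := (List.foldl_flatten ..).symm
    have hcsn : seen.contains s = decide (s ∈ fn) := by
      by_cases h : s ∈ fn
      · simp [h, (hinv s).1 h]
      · have h2 : s ∉ seen := fun hs => h ((hinv s).2 hs)
        simp [h, h2]
    rw [avgLoop, bGo, hflat, avgScan]
    by_cases hmem : s ∈ fn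
    · simp [hmem, (hinv s).1 hmem]
    · have hcs := hc s
      by_cases h0 : groups.flatten.count s = 0
      · have : counts.getD s 0 ≠ 1 := by rw [hcs, h0]; decide
        simp [hmem, h0, this]
      · by_cases h1 : groups.flatten.count s = 1
        · have hone : counts.getD s 0 = 1 := by rw [hcs, h1]; rfl
          simp only [hmem, h1, hcsn, hone, if_false, decide_true, decide_false,
            beq_self_eq_true, Bool.not_true, Bool.or_false]
          exact ih _ _ (fun x => by simp [PySem.Set.mem_add, hinv x, or_comm])
        · have : counts.getD s 0 ≠ 1 := by
            rw [hcs]; intro h; apply h1; exact_mod_cast h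
          simp [hmem, h0, h1, this]

-- ===== VERDICT (by name: the statement is the Claim_ definition above) =====
theorem are_valid_groups_spec : Claim_equal_are_valid_groups := by
  intro studentNumbers Groups _
  unfold Spec_are_valid_groups are_valid_groups are_valid_groups_alt
  simp only [PySem.List.foldl_append_singleton_eq_map]
  have hcounts : Groups.foldl
      (fun d g => (g.map (fun x => PySem.Int.toStr x)).foldl (fun d m => d.modify m 0 (· + 1)) d)
      PySem.Dict.empty
      = PySem.Dict.counter ((Groups.map (fun g => g.map (fun x => PySem.Int.toStr x))).flatten) := by
    rw [PySem.Dict.counter_eq_foldl, List.foldl_flatten, List.foldl_map]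
  rw [hcounts]
  apply mainEq
  · intro x
    exact PySem.Dict.getD_counter ..
  · intro x; simp [PySem.Set.empty]
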